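-- pv_equiv track=rewrite | github.com/dstar55/100-words-design-patterns-java | utils.py | getFilePosition
-- ===== SOURCE A (Python) =====
-- orderedPatternFilesDict = {"Singleton":( "Singleton.java",), # note that if there is just one item in a tuple, than we must add comma at the end of the statement, otherwise it will be threated as a string
--                             "Prototype":( "Prototype.java", "ConcretePrototype.java", "Client.java"),
--                             "Builder":( "Builder.java", "ConcreteBuilder.java", "Product.java", "Director.java" ),
--                             "FactoryMethod":( "Product.java", "ConcreteProductA.java", "ConcreteProductB.java", "Creator.java", "ConcreteCreator.java"),
--                             "AbstractFactory":( "AbstractProductA.java", "ProductA1.java",  "ProductA2.java", "AbstractProductB.java", "ProductB1.java", "ProductB2.java", "AbstractFactory.java" ,  "ConcreteFactory1.java", "ConcreteFactory2.java" ),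
--                             "Adapter":(),
--                             "Bridge":("Implementor.java", "ConcreteImplementorA.java", "ConcreteImplementorB.java", "RefinedAbstraction.java", "Abstraction.java"),
--                             "Composite":("Component.java", "Leaf.java", "Composite.java" ),
--                             "Decorator":("Component.java", "ConcreteComponent.java", "Decorator.java", "ConcreteDecoratorA.java", "ConcreteDecoratorB.java" ),
--                             "Facade":("Compiler.java", "Tokenizer.java", "Generator.java", "Node.java", "ExpressionNode.java",  "OperandNode.java", "Parser.java"  ),
--                             "Flyweight":("Flyweight.java", "ConcreteFlyweight.java", "UnsharedConcreteFlyweight.java", "FlyweightFactory.java" ),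
--                             "Proxy":("Subject.java", "RealSubject.java", "Proxy.java"),
--                             "ChainOfResponsibility":( "Handler.java", "ConcreteHandler1.java", "ConcreteHandler2.java" ),
--                             "Command":( "Command.java", "ConcreteCommand.java", "Receiver.java", "Invoker.java" ),
--                             "Interpreter":( "AbstractExpression.java", "AndExpression.java", "OrExpression.java", "TerminalExpression.java", "Context.java" ),
--                             "Iterator":( "Iterator.java", "ConcreteIterator.java", "Aggregate.java", "ConcreteAggregate.java"   ),
--                             "Mediator":( "Colleague.java", "ConcreteColleague1.java", "ConcreteColleague2.java", "Mediator.java", "ConcreteMediator.java" ),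
--                             "Memento":( "Memento.java", "Originator.java", "Caretaker.java" ),
--                             "Observer":( "Observer.java", "ConcreteObserver.java", "Subject.java", "ConcreteSubject.java"  ),
--                             "State":( "State.java", "ConcreteState1.java", "ConcreteState2.java", "Context.java" ),
--                             "Strategy":( "Strategy.java", "ConcreteStrategyA.java", "ConcreteStrategyB.java", "ConcreteStrategyC.java", "Context.java"  ),
--                             "TemplateMethod":( "AbstractClass.java", "ConcreteClass.java" ),
--                             "Visitor":( "Element.java", "ConcreteElementA.java", "ConcreteElementB.java", "Visitor.java", "ConcreteVisitor1.java", "ConcreteVisitor2.java", "ObjectStructure.java" )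
--                         }
--
-- def getFilePosition(patternName, fileName):
--
--     counter = 0
--     try:
--         for item in orderedPatternFilesDict.get(patternName):
--             counter = counter + 1
--
--             if str(item) == fileName:
--                 return counter
--     except TypeError as e:
--         return -1
--
--     return -1
-- ===== SOURCE B (Python) =====
-- # Precomputed flat position index (generated from orderedPatternFilesDict in utils.py):
-- # maps "pattern/file" -> 1-based position; pattern names and file names contain no "/".
-- POSITIONS = {
--     'Singleton/Singleton.java': 1,
--     'Prototype/Prototype.java': 1,
--     'Prototype/ConcretePrototype.java': 2,
--     'Prototype/Client.java': 3,
--     'Builder/Builder.java': 1,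
--     'Builder/ConcreteBuilder.java': 2,
--     'Builder/Product.java': 3,
--     'Builder/Director.java': 4,
--     'FactoryMethod/Product.java': 1,
--     'FactoryMethod/ConcreteProductA.java': 2,
--     'FactoryMethod/ConcreteProductB.java': 3,
--     'FactoryMethod/Creator.java': 4,
--     'FactoryMethod/ConcreteCreator.java': 5,
--     'AbstractFactory/AbstractProductA.java': 1,
--     'AbstractFactory/ProductA1.java': 2,
--     'AbstractFactory/ProductA2.java': 3,
--     'AbstractFactory/AbstractProductB.java': 4,
--     'AbstractFactory/ProductB1.java': 5,
--     'AbstractFactory/ProductB2.java': 6,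
--     'AbstractFactory/AbstractFactory.java': 7,
--     'AbstractFactory/ConcreteFactory1.java': 8,
--     'AbstractFactory/ConcreteFactory2.java': 9,
--     'Bridge/Implementor.java': 1,
--     'Bridge/ConcreteImplementorA.java': 2,
--     'Bridge/ConcreteImplementorB.java': 3,
--     'Bridge/RefinedAbstraction.java': 4,
--     'Bridge/Abstraction.java': 5,
--     'Composite/Component.java': 1,
--     'Composite/Leaf.java': 2,
--     'Composite/Composite.java': 3,
--     'Decorator/Component.java': 1,
--     'Decorator/ConcreteComponent.java': 2,
--     'Decorator/Decorator.java': 3,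
--     'Decorator/ConcreteDecoratorA.java': 4,
--     'Decorator/ConcreteDecoratorB.java': 5,
--     'Facade/Compiler.java': 1,
--     'Facade/Tokenizer.java': 2,
--     'Facade/Generator.java': 3,
--     'Facade/Node.java': 4,
--     'Facade/ExpressionNode.java': 5,
--     'Facade/OperandNode.java': 6,
--     'Facade/Parser.java': 7,
--     'Flyweight/Flyweight.java': 1,
--     'Flyweight/ConcreteFlyweight.java': 2,
--     'Flyweight/UnsharedConcreteFlyweight.java': 3,
--     'Flyweight/FlyweightFactory.java': 4,
--     'Proxy/Subject.java': 1,
--     'Proxy/RealSubject.java': 2,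
--     'Proxy/Proxy.java': 3,
--     'ChainOfResponsibility/Handler.java': 1,
--     'ChainOfResponsibility/ConcreteHandler1.java': 2,
--     'ChainOfResponsibility/ConcreteHandler2.java': 3,
--     'Command/Command.java': 1,
--     'Command/ConcreteCommand.java': 2,
--     'Command/Receiver.java': 3,
--     'Command/Invoker.java': 4,
--     'Interpreter/AbstractExpression.java': 1,
--     'Interpreter/AndExpression.java': 2,
--     'Interpreter/OrExpression.java': 3,
--     'Interpreter/TerminalExpression.java': 4,
--     'Interpreter/Context.java': 5,
--     'Iterator/Iterator.java': 1,
--     'Iterator/ConcreteIterator.java': 2,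
--     'Iterator/Aggregate.java': 3,
--     'Iterator/ConcreteAggregate.java': 4,
--     'Mediator/Colleague.java': 1,
--     'Mediator/ConcreteColleague1.java': 2,
--     'Mediator/ConcreteColleague2.java': 3,
--     'Mediator/Mediator.java': 4,
--     'Mediator/ConcreteMediator.java': 5,
--     'Memento/Memento.java': 1,
--     'Memento/Originator.java': 2,
--     'Memento/Caretaker.java': 3,
--     'Observer/Observer.java': 1,
--     'Observer/ConcreteObserver.java': 2,
--     'Observer/Subject.java': 3,
--     'Observer/ConcreteSubject.java': 4,
--     'State/State.java': 1,
--     'State/ConcreteState1.java': 2,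
--     'State/ConcreteState2.java': 3,
--     'State/Context.java': 4,
--     'Strategy/Strategy.java': 1,
--     'Strategy/ConcreteStrategyA.java': 2,
--     'Strategy/ConcreteStrategyB.java': 3,
--     'Strategy/ConcreteStrategyC.java': 4,
--     'Strategy/Context.java': 5,
--     'TemplateMethod/AbstractClass.java': 1,
--     'TemplateMethod/ConcreteClass.java': 2,
--     'Visitor/Element.java': 1,
--     'Visitor/ConcreteElementA.java': 2,
--     'Visitor/ConcreteElementB.java': 3,
--     'Visitor/Visitor.java': 4,
--     'Visitor/ConcreteVisitor1.java': 5,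
--     'Visitor/ConcreteVisitor2.java': 6,
--     'Visitor/ObjectStructure.java': 7,
-- }
--
-- def getFilePosition(patternName, fileName):
--     return POSITIONS.get(patternName + "/" + fileName, -1)
-- ===== Notes on version B (the rewrite author's own statement) =====
-- stated objective: alternative
-- what changed: B replaces A's per-call counter loop over the pattern's tuple (with a caught TypeError for unknown patterns) by a precomputed flat dict mapping the composite key 'pattern/file' to its 1-based position, so a call is a single dict lookup with default -1 and no loop or exception handling; pattern and file names contain no '/', so the composite key is unambiguous.
import Mathlib
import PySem

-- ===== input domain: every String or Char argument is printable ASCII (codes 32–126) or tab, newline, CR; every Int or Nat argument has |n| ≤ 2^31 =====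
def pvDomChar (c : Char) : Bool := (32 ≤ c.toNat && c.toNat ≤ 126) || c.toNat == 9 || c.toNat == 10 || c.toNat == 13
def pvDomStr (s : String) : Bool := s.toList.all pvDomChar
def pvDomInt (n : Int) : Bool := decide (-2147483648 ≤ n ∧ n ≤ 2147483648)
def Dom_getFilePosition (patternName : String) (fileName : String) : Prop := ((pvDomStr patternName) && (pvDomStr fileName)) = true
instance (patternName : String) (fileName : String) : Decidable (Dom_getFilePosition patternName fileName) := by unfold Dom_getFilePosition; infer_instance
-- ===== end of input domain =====

-- ===== PORT A =====
-- B replaces A's per-call counter loop over the pattern's tuple (with its caught TypeError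
-- for unknown patterns) by a single precomputed flat table "pattern/file" -> position,
-- so a call is one composite-key lookup with default -1 (alternative decomposition).

-- the module-level dict literal of A, in insertion order
def pvData : List (String × List String) :=
  [("Singleton", ["Singleton.java"]),
   ("Prototype", ["Prototype.java", "ConcretePrototype.java", "Client.java"]),
   ("Builder", ["Builder.java", "ConcreteBuilder.java", "Product.java", "Director.java"]),
   ("FactoryMethod", ["Product.java", "ConcreteProductA.java", "ConcreteProductB.java", "Creator.java", "ConcreteCreator.java"]),
   ("AbstractFactory", ["AbstractProductA.java", "ProductA1.java", "ProductA2.java", "AbstractProductB.java", "ProductB1.java", "ProductB2.java", "AbstractFactory.java", "ConcreteFactory1.java", "ConcreteFactory2.java"]),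
   ("Adapter", []),
   ("Bridge", ["Implementor.java", "ConcreteImplementorA.java", "ConcreteImplementorB.java", "RefinedAbstraction.java", "Abstraction.java"]),
   ("Composite", ["Component.java", "Leaf.java", "Composite.java"]),
   ("Decorator", ["Component.java", "ConcreteComponent.java", "Decorator.java", "ConcreteDecoratorA.java", "ConcreteDecoratorB.java"]),
   ("Facade", ["Compiler.java", "Tokenizer.java", "Generator.java", "Node.java", "ExpressionNode.java", "OperandNode.java", "Parser.java"]),
   ("Flyweight", ["Flyweight.java", "ConcreteFlyweight.java", "UnsharedConcreteFlyweight.java", "FlyweightFactory.java"]),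
   ("Proxy", ["Subject.java", "RealSubject.java", "Proxy.java"]),
   ("ChainOfResponsibility", ["Handler.java", "ConcreteHandler1.java", "ConcreteHandler2.java"]),
   ("Command", ["Command.java", "ConcreteCommand.java", "Receiver.java", "Invoker.java"]),
   ("Interpreter", ["AbstractExpression.java", "AndExpression.java", "OrExpression.java", "TerminalExpression.java", "Context.java"]),
   ("Iterator", ["Iterator.java", "ConcreteIterator.java", "Aggregate.java", "ConcreteAggregate.java"]),
   ("Mediator", ["Colleague.java", "ConcreteColleague1.java", "ConcreteColleague2.java", "Mediator.java", "ConcreteMediator.java"]),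
   ("Memento", ["Memento.java", "Originator.java", "Caretaker.java"]),
   ("Observer", ["Observer.java", "ConcreteObserver.java", "Subject.java", "ConcreteSubject.java"]),
   ("State", ["State.java", "ConcreteState1.java", "ConcreteState2.java", "Context.java"]),
   ("Strategy", ["Strategy.java", "ConcreteStrategyA.java", "ConcreteStrategyB.java", "ConcreteStrategyC.java", "Context.java"]),
   ("TemplateMethod", ["AbstractClass.java", "ConcreteClass.java"]),
   ("Visitor", ["Element.java", "ConcreteElementA.java", "ConcreteElementB.java", "Visitor.java", "ConcreteVisitor1.java", "ConcreteVisitor2.java", "ObjectStructure.java"])]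

def orderedPatternFilesDict : PySem.Dict String (List String) := PySem.Dict.mk pvData

-- the for-loop with the counter; the TypeError branch (iterating None) is the none case
def pvLoopA : List String → String → Int → Int
  | [], _, _ => -1
  | item :: rest, fileName, counter =>
    if item == fileName then counter + 1 else pvLoopA rest fileName (counter + 1)

def getFilePosition (patternName : String) (fileName : String) : Int :=
  match orderedPatternFilesDict.get? patternName with
  | none => -1
  | some files => pvLoopA files fileName 0

-- ===== PORT B =====
-- the module-level literal POSITIONS of Source B: "pattern/file" -> 1-based position
def pvFlat : List (String × Int) :=
  [("Singleton/Singleton.java", 1),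
   ("Prototype/Prototype.java", 1),
   ("Prototype/ConcretePrototype.java", 2),
   ("Prototype/Client.java", 3),
   ("Builder/Builder.java", 1),
   ("Builder/ConcreteBuilder.java", 2),
   ("Builder/Product.java", 3),
   ("Builder/Director.java", 4),
   ("FactoryMethod/Product.java", 1),
   ("FactoryMethod/ConcreteProductA.java", 2),
   ("FactoryMethod/ConcreteProductB.java", 3),
   ("FactoryMethod/Creator.java", 4),
   ("FactoryMethod/ConcreteCreator.java", 5),
   ("AbstractFactory/AbstractProductA.java", 1),
   ("AbstractFactory/ProductA1.java", 2),
   ("AbstractFactory/ProductA2.java", 3),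
   ("AbstractFactory/AbstractProductB.java", 4),
   ("AbstractFactory/ProductB1.java", 5),
   ("AbstractFactory/ProductB2.java", 6),
   ("AbstractFactory/AbstractFactory.java", 7),
   ("AbstractFactory/ConcreteFactory1.java", 8),
   ("AbstractFactory/ConcreteFactory2.java", 9),
   ("Bridge/Implementor.java", 1),
   ("Bridge/ConcreteImplementorA.java", 2),
   ("Bridge/ConcreteImplementorB.java", 3),
   ("Bridge/RefinedAbstraction.java", 4),
   ("Bridge/Abstraction.java", 5),
   ("Composite/Component.java", 1),
   ("Composite/Leaf.java", 2),
   ("Composite/Composite.java", 3),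
   ("Decorator/Component.java", 1),
   ("Decorator/ConcreteComponent.java", 2),
   ("Decorator/Decorator.java", 3),
   ("Decorator/ConcreteDecoratorA.java", 4),
   ("Decorator/ConcreteDecoratorB.java", 5),
   ("Facade/Compiler.java", 1),
   ("Facade/Tokenizer.java", 2),
   ("Facade/Generator.java", 3),
   ("Facade/Node.java", 4),
   ("Facade/ExpressionNode.java", 5),
   ("Facade/OperandNode.java", 6),
   ("Facade/Parser.java", 7),
   ("Flyweight/Flyweight.java", 1),
   ("Flyweight/ConcreteFlyweight.java", 2),
   ("Flyweight/UnsharedConcreteFlyweight.java", 3),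
   ("Flyweight/FlyweightFactory.java", 4),
   ("Proxy/Subject.java", 1),
   ("Proxy/RealSubject.java", 2),
   ("Proxy/Proxy.java", 3),
   ("ChainOfResponsibility/Handler.java", 1),
   ("ChainOfResponsibility/ConcreteHandler1.java", 2),
   ("ChainOfResponsibility/ConcreteHandler2.java", 3),
   ("Command/Command.java", 1),
   ("Command/ConcreteCommand.java", 2),
   ("Command/Receiver.java", 3),
   ("Command/Invoker.java", 4),
   ("Interpreter/AbstractExpression.java", 1),
   ("Interpreter/AndExpression.java", 2),
   ("Interpreter/OrExpression.java", 3),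
   ("Interpreter/TerminalExpression.java", 4),
   ("Interpreter/Context.java", 5),
   ("Iterator/Iterator.java", 1),
   ("Iterator/ConcreteIterator.java", 2),
   ("Iterator/Aggregate.java", 3),
   ("Iterator/ConcreteAggregate.java", 4),
   ("Mediator/Colleague.java", 1),
   ("Mediator/ConcreteColleague1.java", 2),
   ("Mediator/ConcreteColleague2.java", 3),
   ("Mediator/Mediator.java", 4),
   ("Mediator/ConcreteMediator.java", 5),
   ("Memento/Memento.java", 1),
   ("Memento/Originator.java", 2),
   ("Memento/Caretaker.java", 3),
   ("Observer/Observer.java", 1),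
   ("Observer/ConcreteObserver.java", 2),
   ("Observer/Subject.java", 3),
   ("Observer/ConcreteSubject.java", 4),
   ("State/State.java", 1),
   ("State/ConcreteState1.java", 2),
   ("State/ConcreteState2.java", 3),
   ("State/Context.java", 4),
   ("Strategy/Strategy.java", 1),
   ("Strategy/ConcreteStrategyA.java", 2),
   ("Strategy/ConcreteStrategyB.java", 3),
   ("Strategy/ConcreteStrategyC.java", 4),
   ("Strategy/Context.java", 5),
   ("TemplateMethod/AbstractClass.java", 1),
   ("TemplateMethod/ConcreteClass.java", 2),
   ("Visitor/Element.java", 1),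
   ("Visitor/ConcreteElementA.java", 2),
   ("Visitor/ConcreteElementB.java", 3),
   ("Visitor/Visitor.java", 4),
   ("Visitor/ConcreteVisitor1.java", 5),
   ("Visitor/ConcreteVisitor2.java", 6),
   ("Visitor/ObjectStructure.java", 7)]

def POSITIONS : PySem.Dict String Int := PySem.Dict.mk pvFlat

def getFilePosition_alt (patternName : String) (fileName : String) : Int :=
  POSITIONS.getD (patternName ++ "/" ++ fileName) (-1)

-- ===== PRECONDITION & SPEC =====
def Spec_getFilePosition (patternName : String) (fileName : String) (out : Int) : Prop := out = getFilePosition_alt patternName fileName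
instance (patternName : String) (fileName : String) (out : Int) : Decidable (Spec_getFilePosition patternName fileName out) := by unfold Spec_getFilePosition; infer_instance

-- ===== CLAIM (what is proved, stated in full; the proofs are below) =====
def Claim_equal_getFilePosition : Prop := ∀ (patternName : String) (fileName : String), Dom_getFilePosition patternName fileName → Spec_getFilePosition patternName fileName (getFilePosition patternName fileName)

-- ===== LEMMAS AND PROOFS =====

-- proof-side reconstruction of the flat table from the structured data
def pvGroup (P : String) (files : List String) (c : Int) : List (String × Int) :=
  (PySem.List.enumerate files c).map (fun q => (P ++ "/" ++ q.2, q.1 + 1))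

def pvBuild : List (String × List String) → List (String × Int)
  | [] => []
  | (P, fs) :: rest => pvGroup P fs 0 ++ pvBuild rest

-- splitting at a separator that the right-hand parts avoid is unique
theorem pv_sep_split {α : Type} (c : α) :
    ∀ (l1 l3 : List α) {l2 l4 : List α}, l1 ++ c :: l2 = l3 ++ c :: l4 → c ∉ l3 → c ∉ l4 →
    l1 = l3 ∧ l2 = l4 := by
  intro l1
  induction l1 with
  | nil =>
    intro l3 l2 l4 h h3 h4
    cases l3 with
    | nil => simpa using h
    | cons x xs =>
      simp only [List.nil_append, List.cons_append, List.cons.injEq] at h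
      exact absurd (h.1 ▸ List.mem_cons_self ..) h3
  | cons a as ih =>
    intro l3 l2 l4 h h3 h4
    cases l3 with
    | nil =>
      simp only [List.nil_append, List.cons_append, List.cons.injEq] at h
      exact absurd (h.2 ▸ List.mem_append_right as (List.mem_cons_self ..)) h4
    | cons x xs =>
      simp only [List.cons_append, List.cons.injEq] at h
      have := ih xs h.2 (fun hc => h3 (List.mem_cons_of_mem _ hc)) h4
      exact ⟨by rw [h.1, this.1], this.2⟩

-- a composite key equals a table key iff both components match (table parts slash-free)
theorem pv_key_iff (p f P F : String) (hP : '/' ∉ P.toList) (hF : '/' ∉ F.toList) :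
    p ++ "/" ++ f = P ++ "/" ++ F ↔ (p = P ∧ f = F) := by
  constructor
  · intro h
    have hl : p.toList ++ '/' :: f.toList = P.toList ++ '/' :: F.toList := by
      have := congrArg String.toList h
      simpa [String.toList_append] using this
    have := pv_sep_split '/' p.toList P.toList hl hP hF
    exact ⟨String.toList_inj.mp this.1, String.toList_inj.mp this.2⟩
  · rintro ⟨rfl, rfl⟩; rfl

-- same pattern on both sides: the key matches iff the file matches
theorem pv_key_same (p f g : String) : p ++ "/" ++ f = p ++ "/" ++ g ↔ f = g := by
  constructor
  · intro h
    have hl : p.toList ++ '/' :: f.toList = p.toList ++ '/' :: g.toList := by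
      have := congrArg String.toList h
      simpa [String.toList_append] using this
    have := List.append_cancel_left hl
    exact String.toList_inj.mp (by simpa using this)
  · intro h; rw [h]

theorem pv_loop_notmem (fn : String) :
    ∀ (files : List String), fn ∉ files → ∀ c, pvLoopA files fn c = -1 := by
  intro files
  induction files with
  | nil => intro _ _; rfl
  | cons f fs ih =>
    intro h c
    simp only [List.mem_cons, not_or] at h
    simp only [pvLoopA]
    rw [if_neg (show ¬ (f == fn) = true from by
      simp only [beq_iff_eq]; exact fun e => h.1 e.symm)]
    exact ih h.2 (c + 1)

-- scanning the group of the matching pattern is A's counter loop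
theorem pv_group_scan (pn fn : String) :
    ∀ (files : List String) (c : Int) (rest : List (String × Int)),
    (PySem.Dict.mk (pvGroup pn files c ++ rest)).get? (pn ++ "/" ++ fn)
      = if fn ∈ files then some (pvLoopA files fn c)
        else (PySem.Dict.mk rest).get? (pn ++ "/" ++ fn) := by
  intro files
  induction files with
  | nil => intro c rest; simp [pvGroup, PySem.List.enumerate_nil]
  | cons f fs ih =>
    intro c rest
    rw [show pvGroup pn (f :: fs) c = (pn ++ "/" ++ f, c + 1) :: pvGroup pn fs (c + 1) from by
      simp [pvGroup, PySem.List.enumerate_cons]]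
    rw [List.cons_append, PySem.Dict.get?_mk_cons]
    by_cases hf : f = fn
    · subst hf
      simp [pvLoopA]
    · rw [if_neg (show ¬ (pn ++ "/" ++ f == pn ++ "/" ++ fn) = true from by
        simp only [beq_iff_eq]; exact fun e => hf ((pv_key_same pn f fn).mp e)), ih (c + 1) rest]
      rw [show pvLoopA (f :: fs) fn c = pvLoopA fs fn (c + 1) from by
            simp only [pvLoopA]
            rw [if_neg (show ¬ (f == fn) = true from by
              simp only [beq_iff_eq]; exact hf)]]
      exact (if_congr (by rw [List.mem_cons]; exact or_iff_right (fun e => hf e.symm)) rfl rfl).symm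

-- the group of a different slash-free pattern never matches the composite key
theorem pv_group_skip (pn fn P : String) (hne : pn ≠ P) (hP : '/' ∉ P.toList) :
    ∀ (files : List String) (c : Int) (rest : List (String × Int)),
    (∀ f ∈ files, '/' ∉ f.toList) →
    (PySem.Dict.mk (pvGroup P files c ++ rest)).get? (pn ++ "/" ++ fn)
      = (PySem.Dict.mk rest).get? (pn ++ "/" ++ fn) := by
  intro files
  induction files with
  | nil => intro c rest _; simp [pvGroup, PySem.List.enumerate_nil]
  | cons f fs ih =>
    intro c rest hsl
    rw [show pvGroup P (f :: fs) c = (P ++ "/" ++ f, c + 1) :: pvGroup P fs (c + 1) from by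
      simp [pvGroup, PySem.List.enumerate_cons]]
    rw [List.cons_append, PySem.Dict.get?_mk_cons,
        if_neg (by
          simp only [beq_iff_eq]
          intro e
          exact hne ((pv_key_iff pn fn P f hP (hsl f (List.mem_cons_self ..))).mp e.symm).1)]
    exact ih (c + 1) rest (fun g hg => hsl g (List.mem_cons_of_mem _ hg))

-- no group of the remaining (distinct, slash-free) patterns matches
theorem pv_rest_skip (pn fn : String) :
    ∀ (rest : List (String × List String)), pn ∉ rest.map Prod.fst →
    (∀ e ∈ rest, '/' ∉ e.1.toList ∧ ∀ f ∈ e.2, '/' ∉ f.toList) →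
    (PySem.Dict.mk (pvBuild rest)).get? (pn ++ "/" ++ fn) = none := by
  intro rest
  induction rest with
  | nil => intro _ _; rfl
  | cons e es ih =>
    intro hmem hsl
    obtain ⟨P, fs⟩ := e
    simp only [List.map_cons, List.mem_cons, not_or] at hmem
    have he := hsl (P, fs) (List.mem_cons_self ..)
    rw [show pvBuild ((P, fs) :: es) = pvGroup P fs 0 ++ pvBuild es from rfl,
        pv_group_skip pn fn P hmem.1 he.1 fs 0 _ he.2]
    exact ih hmem.2 (fun q hq => hsl q (List.mem_cons_of_mem _ hq))

-- the whole program, by induction over the module data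
theorem pv_main (pn fn : String) :
    ∀ (data : List (String × List String)), (data.map Prod.fst).Nodup →
    (∀ e ∈ data, '/' ∉ e.1.toList ∧ ∀ f ∈ e.2, '/' ∉ f.toList) →
    (match (PySem.Dict.mk data).get? pn with
     | none => (-1 : Int)
     | some files => pvLoopA files fn 0)
      = ((PySem.Dict.mk (pvBuild data)).get? (pn ++ "/" ++ fn)).getD (-1) := by
  intro data
  induction data with
  | nil => intro _ _; rfl
  | cons e es ih =>
    intro hnd hsl
    obtain ⟨P, fs⟩ := e
    rw [List.map_cons, List.nodup_cons] at hnd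
    have he := hsl (P, fs) (List.mem_cons_self ..)
    have hes := fun q hq => hsl q (List.mem_cons_of_mem _ hq)
    rw [PySem.Dict.get?_mk_cons,
        show pvBuild ((P, fs) :: es) = pvGroup P fs 0 ++ pvBuild es from rfl]
    by_cases hk : P = pn
    · subst hk
      rw [if_pos (by simp), pv_group_scan P fn fs 0 (pvBuild es)]
      by_cases hmem : fn ∈ fs
      · simp [hmem]
      · rw [if_neg hmem, pv_rest_skip P fn es hnd.1 hes]
        simp [pv_loop_notmem fn fs hmem 0]
    · rw [if_neg (by simpa using hk), pv_group_skip pn fn P (Ne.symm hk) he.1 fs 0 _ he.2]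
      exact ih hnd.2 hes

-- the literal table of the B port is exactly the flat build of the module data
theorem pv_flat_eq : pvFlat = pvBuild pvData := by decide

-- ===== VERDICT (by name: the statement is the Claim_ definition above) =====
theorem getFilePosition_spec : Claim_equal_getFilePosition := by
  intro pn fn _
  unfold Spec_getFilePosition getFilePosition getFilePosition_alt POSITIONS orderedPatternFilesDict
  rw [PySem.Dict.getD_eq_get?_getD, pv_flat_eq]
  exact pv_main pn fn pvData (by decide) (by decide)
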